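-- pv_equiv track=rewrite | github.com/gabrielemongirdaite/advent_of_code_2023 | day11.py | expand_universe
-- ===== SOURCE A (Python) =====
-- def expand_universe(universe):
--     len_row = len(universe[0])
--     len_column = len(universe)
--     rows_to_expand = []
--     columns_to_expand = []
--     columns = []
--     for y, i in enumerate(universe):
--         if i == '.' * len_row:
--             rows_to_expand.append(y)
--     for y, i in enumerate(universe):
--         for x, j in enumerate(i):
--             if y == 0:
--                 columns.append(j)
--             else:
--                 columns[x] = columns[x] + j
--     for x, i in enumerate(columns):
--         if i == '.' * len_column:
--             columns_to_expand.append(x)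
--     return rows_to_expand, columns_to_expand
-- ===== SOURCE B (Python) =====
-- def expand_universe(universe):
--     width = len(universe[0])
--     height = len(universe)
--     col_dots = [0] * width
--     rows_to_expand = []
--     for y, row in enumerate(universe):
--         if row.count('.') == width:
--             rows_to_expand.append(y)
--         for x, c in enumerate(row):
--             col_dots[x] += c == '.'
--     columns_to_expand = [x for x in range(width) if col_dots[x] == height]
--     return rows_to_expand, columns_to_expand
-- ===== Notes on version B (the rewrite author's own statement) =====
-- stated objective: faster
-- what changed: B makes one pass over the grid keeping an integer dot-counter per column (col_dots[x] += c == '.') and decides rows by row.count('.') and columns by counter == height, instead of A's staged passes that build every column as a string by repeated per-character concatenation and then compare against dot strings.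
import Mathlib
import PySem

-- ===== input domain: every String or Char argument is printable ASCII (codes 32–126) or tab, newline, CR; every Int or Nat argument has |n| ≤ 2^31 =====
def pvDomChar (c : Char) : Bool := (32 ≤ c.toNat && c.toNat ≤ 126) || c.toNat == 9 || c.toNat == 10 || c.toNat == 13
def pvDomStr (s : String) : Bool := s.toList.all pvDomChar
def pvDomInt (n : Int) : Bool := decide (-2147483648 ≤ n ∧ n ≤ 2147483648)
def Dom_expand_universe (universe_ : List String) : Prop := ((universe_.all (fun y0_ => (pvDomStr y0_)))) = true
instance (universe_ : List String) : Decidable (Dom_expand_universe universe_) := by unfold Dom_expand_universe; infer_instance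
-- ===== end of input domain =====

-- B replaces A's staged passes (building every column as a string by repeated concatenation,
-- then comparing against dot strings) with a single pass keeping one per-column dot COUNTER,
-- deciding rows by row.count('.') and columns by counter == height; equivalence is proved on
-- every input on which A returns (Pre_: non-empty, no row longer than row 0).

-- ===== PORT A =====
-- literal transliteration of A; strings are handled on the List Char side
-- ('.' * len is List.replicate, s1 == s2 is toList equality, + on strings is ++)
def expand_universe (universe_ : List String) : List Int × List Int :=
  let len_row := (universe_.headD "").toList.length        -- len(universe[0]); IndexError on [] is excluded by Pre_
  let len_column := universe_.length
  let rows_to_expand := (PySem.List.enumerate universe_ 0).foldl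
      (fun acc p => if p.2.toList = List.replicate len_row '.' then acc ++ [p.1] else acc) []
  let columns := (PySem.List.enumerate universe_ 0).foldl
      (fun (cols : List (List Char)) p =>
        (PySem.List.enumerate p.2.toList 0).foldl
          (fun cols q =>
            if p.1 = 0 then cols ++ [[q.2]]
            else PySem.List.pySetD cols q.1 ((PySem.List.pyGetD cols q.1 []) ++ [q.2])) cols) []
  let columns_to_expand := (PySem.List.enumerate columns 0).foldl
      (fun acc p => if p.2 = List.replicate len_column '.' then acc ++ [p.1] else acc) []
  (rows_to_expand, columns_to_expand)

-- ===== PORT B =====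
-- literal transliteration of Source B: ONE pass over the rows carrying (rows_to_expand, col_dots),
-- where col_dots[x] += (c == '.') is the per-cell counter update, then a range comprehension
def expand_universe_alt (universe_ : List String) : List Int × List Int :=
  let width := (universe_.headD "").toList.length
  let height := universe_.length
  let st := (PySem.List.enumerate universe_ 0).foldl
      (fun (st : List Int × List Int) p =>
        (if PySem.Str.count p.2 "." == width then st.1 ++ [p.1] else st.1,
         (PySem.List.enumerate p.2.toList 0).foldl
           (fun cd q => PySem.List.pySetD cd q.1
             (PySem.List.pyGetD cd q.1 0 + (if q.2 == '.' then 1 else 0))) st.2))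
      ([], List.replicate width (0 : Int))
  (st.1, (PySem.List.pyRange 0 (width : Int) 1).filter
      (fun x => PySem.List.pyGetD st.2 x 0 == (height : Int)))

-- ===== PRECONDITION & SPEC =====
-- Pre_ is exactly the set of inputs on which A returns: A raises IndexError on the empty
-- list (universe[0]) and on any row longer than row 0 (columns[x] with x past the end).
def Pre_expand_universe (universe_ : List String) : Prop :=
  universe_ ≠ [] ∧ ∀ s ∈ universe_, s.toList.length ≤ (universe_.headD "").toList.length
instance (universe_ : List String) : Decidable (Pre_expand_universe universe_) := by
  unfold Pre_expand_universe; infer_instance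

def pvWitness_expand_universe : List String := ["#.", "..", ".#"]

def Spec_expand_universe (universe_ : List String) (out : List Int × List Int) : Prop := out = expand_universe_alt universe_
instance (universe_ : List String) (out : List Int × List Int) : Decidable (Spec_expand_universe universe_ out) := by unfold Spec_expand_universe; infer_instance

-- ===== CLAIM (what is proved, stated in full; the proofs are below) =====
def Claim_equal_expand_universe : Prop := ∀ (universe_ : List String), Dom_expand_universe universe_ → Pre_expand_universe universe_ → Spec_expand_universe universe_ (expand_universe universe_)

-- ===== LEMMAS AND PROOFS =====

-- Chars.count with a single-character needle is List.count
lemma count_go_single (c : Char) : ∀ (l : List Char) (fuel acc : Nat), l.length ≤ fuel →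
    PySem.Chars.count.go [c] fuel l acc = acc + l.count c := by
  intro l
  induction l with
  | nil => intro fuel acc _; cases fuel <;> simp [PySem.Chars.count.go]
  | cons h t ih =>
    intro fuel acc hf
    match fuel, hf with
    | Nat.succ f, hf =>
      rw [PySem.Chars.count.go]
      by_cases hc : c = h
      · subst hc
        simp only [List.isPrefixOf, BEq.rfl, Bool.true_and, if_true, List.length_cons,
          List.length_nil, List.drop_succ_cons, List.drop_zero]
        rw [ih f (acc + 1) (by simpa using hf)]
        simp
        omega
      · have hpre : ([c].isPrefixOf (h :: t)) = false := by
          simp only [List.isPrefixOf, Bool.and_eq_false_iff, beq_eq_false_iff_ne, ne_eq]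
          left; exact hc
        rw [hpre]
        simp only [Bool.false_eq_true, if_false]
        rw [ih f acc (by simpa using hf)]
        simp only [List.count_cons, beq_iff_eq]
        have : ¬ (h = c) := fun hh => absurd hh.symm hc
        simp [this]

lemma count_single (cs : List Char) (c : Char) : PySem.Chars.count cs [c] = cs.count c := by
  simp [PySem.Chars.count, count_go_single]

-- a row no longer than w is the all-dot row of width w iff its dot count is w
lemma count_eq_width_iff (cs : List Char) (w : Nat) (h : cs.length ≤ w) :
    cs.count '.' = w ↔ cs = List.replicate w '.' := by
  constructor
  · intro hc
    have hle : cs.count '.' ≤ cs.length := List.count_le_length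
    have hlen : cs.length = w := by omega
    have hall : ∀ b ∈ cs, '.' = b := List.count_eq_length.mp (by omega)
    rw [List.eq_replicate_iff]
    exact ⟨hlen, fun b hb => (hall b hb).symm⟩
  · intro hc
    subst hc
    simp

-- an if whose Prop and Bool tests agree picks the same branch
lemma ite_test_eq {β : Type} (P : Prop) [Decidable P] (b : Bool) (h : P ↔ b = true) (x y : β) :
    (if P then x else y) = (if b then x else y) := by
  by_cases hb : b = true <;> simp [hb, h]

-- B's pair-state loop: the two components are updated independently, so it splits in two folds
lemma alt_fold_split (w : Nat) :
    ∀ (u : List String) (s : Int) (b c : List Int),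
    (PySem.List.enumerate u s).foldl
      (fun (st : List Int × List Int) p =>
        (if PySem.Str.count p.2 "." == w then st.1 ++ [p.1] else st.1,
         (PySem.List.enumerate p.2.toList 0).foldl
           (fun cd q => PySem.List.pySetD cd q.1
             (PySem.List.pyGetD cd q.1 0 + (if q.2 == '.' then 1 else 0))) st.2)) (b, c)
    = ((PySem.List.enumerate u s).foldl
        (fun acc p => if PySem.Str.count p.2 "." == w then acc ++ [p.1] else acc) b,
       u.foldl (fun cd r => (PySem.List.enumerate r.toList 0).foldl
           (fun cd q => PySem.List.pySetD cd q.1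
             (PySem.List.pyGetD cd q.1 0 + (if q.2 == '.' then 1 else 0))) cd) c) := by
  intro u
  induction u with
  | nil => intro s b c; simp [PySem.List.enumerate]
  | cons r u ih =>
    intro s b c
    rw [PySem.List.enumerate_cons]
    simp only [List.foldl_cons]
    exact ih (s + 1) _ _

-- ---------- the indexed cell-update loop, generic in the cell type ----------

lemma gen_upd_shift {α : Type} (g : α → Char → α) (d : α) :
    ∀ (cs : List Char) (k : Nat) (v : α) (cd : List α),
    (PySem.List.enumerate cs ((k : Int) + 1)).foldl
      (fun cd q => PySem.List.pySetD cd q.1 (g (PySem.List.pyGetD cd q.1 d) q.2)) (v :: cd)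
    = v :: (PySem.List.enumerate cs (k : Int)).foldl
      (fun cd q => PySem.List.pySetD cd q.1 (g (PySem.List.pyGetD cd q.1 d) q.2)) cd := by
  intro cs
  induction cs with
  | nil => intro k v cd; simp [PySem.List.enumerate]
  | cons c cs ih =>
    intro k v cd
    rw [PySem.List.enumerate_cons, PySem.List.enumerate_cons]
    simp only [List.foldl_cons]
    have hk1 : (k : Int) + 1 = ((k + 1 : Nat) : Int) := by push_cast; ring
    have hget : PySem.List.pyGetD (v :: cd) ((k : Int) + 1) d
        = PySem.List.pyGetD cd (k : Int) d := by
      rw [hk1, PySem.List.pyGetD_natCast, PySem.List.pyGetD_natCast]; rfl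
    have hset : ∀ w, PySem.List.pySetD (v :: cd) ((k : Int) + 1) w
        = v :: PySem.List.pySetD cd (k : Int) w := by
      intro w
      rw [hk1, PySem.List.pySetD_natCast, PySem.List.pySetD_natCast, List.set_cons_succ]
    rw [hget, hset]
    have : ((k : Int) + 1) + 1 = ((k + 1 : Nat) : Int) + 1 := by push_cast; ring
    rw [this]
    have := ih (k + 1) v (PySem.List.pySetD cd (k : Int) (g (PySem.List.pyGetD cd (k : Int) d) c))
    push_cast at this ⊢
    simpa using this

lemma gen_upd_row {α : Type} (g : α → Char → α) (d : α) :
    ∀ (cs : List Char) (cd : List α), cs.length ≤ cd.length →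
    (PySem.List.enumerate cs 0).foldl
      (fun cd q => PySem.List.pySetD cd q.1 (g (PySem.List.pyGetD cd q.1 d) q.2)) cd
    = List.zipWith g cd cs ++ cd.drop cs.length := by
  intro cs
  induction cs with
  | nil => intro cd _; simp [PySem.List.enumerate]
  | cons c cs ih =>
    intro cd hlen
    match cd with
    | [] => simp at hlen
    | v :: cd =>
      rw [PySem.List.enumerate_cons]
      simp only [List.foldl_cons]
      have hget : PySem.List.pyGetD (v :: cd) (0 : Int) d = v := by
        have : (0 : Int) = ((0 : Nat) : Int) := by norm_num
        rw [this, PySem.List.pyGetD_natCast]; rfl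
      have hset : PySem.List.pySetD (v :: cd) (0 : Int) (g v c) = g v c :: cd := by
        have : (0 : Int) = ((0 : Nat) : Int) := by norm_num
        rw [this, PySem.List.pySetD_natCast]; rfl
      rw [hget, hset]
      have h01 : (0 : Int) + 1 = ((0 : Nat) : Int) + 1 := by norm_num
      rw [h01, gen_upd_shift]
      have := ih cd (by simpa using hlen)
      simp only [Nat.cast_zero] at this ⊢
      rw [this]
      simp

-- one (possibly short) row merged into per-column cells kept as a map over the column indices
lemma gen_zip_app_map_range {α : Type} (g : α → Char → α) (w : Nat) (g0 : Nat → α)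
    (cs : List Char) (h : cs.length ≤ w) :
    List.zipWith g ((List.range w).map g0) cs ++ ((List.range w).map g0).drop cs.length
      = (List.range w).map
        (fun x => if x < cs.length then g (g0 x) (cs.getD x ' ') else g0 x) := by
  apply List.ext_getElem
  · simp [List.length_zipWith]; omega
  · intro i h1 h2
    simp only [List.length_map, List.length_range] at h2
    by_cases hi : i < cs.length
    · rw [List.getElem_append_left (by simp [List.length_zipWith]; omega)]
      simp only [List.getElem_zipWith, List.getElem_map, List.getElem_range]
      rw [if_pos hi, List.getD_eq_getElem cs ' ' hi]
    · rw [List.getElem_append_right (by simp [List.length_zipWith]; omega)]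
      simp only [List.getElem_drop, List.getElem_map, List.getElem_range,
        List.length_zipWith, List.length_map, List.length_range]
      rw [if_neg hi]
      have : min w cs.length = cs.length := by omega
      rw [this]
      have : cs.length + (i - cs.length) = i := by omega
      simp [this]

-- the whole per-row cell-update pass, row by row (rows may be shorter than w)
lemma gen_rows_fold {α : Type} (g : α → Char → α) (d : α) (w : Nat) :
    ∀ (rows : List String) (g0 : Nat → α),
    (∀ r ∈ rows, r.toList.length ≤ w) →
    rows.foldl (fun cd r =>
        (PySem.List.enumerate r.toList 0).foldl
          (fun cd q => PySem.List.pySetD cd q.1 (g (PySem.List.pyGetD cd q.1 d) q.2)) cd)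
      ((List.range w).map g0)
    = (List.range w).map (fun x => rows.foldl
        (fun a r => if x < r.toList.length then g a (r.toList.getD x ' ') else a) (g0 x)) := by
  intro rows
  induction rows with
  | nil => intro g0 _; simp
  | cons r rows ih =>
    intro g0 hlen
    simp only [List.foldl_cons]
    have hr : r.toList.length ≤ w := hlen r (by simp)
    rw [gen_upd_row g d r.toList ((List.range w).map g0)
      (by simp only [List.length_map, List.length_range]; exact hr)]
    rw [gen_zip_app_map_range g w g0 r.toList hr]
    exact ih _ (fun r hm => hlen r (by simp [hm]))

-- 'for i,x in enumerate(l,s): if P(x): out.append(i)' as a filter of range(s, s+len(l))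
-- when the test depends only on the index
lemma enum_foldl_if_pyRange {α : Type} (P : α → Prop) [DecidablePred P] (Q : Int → Bool) :
    ∀ (l : List α) (s : Int) (acc : List Int),
    (∀ (i : Nat) (h : i < l.length), (P l[i] ↔ Q (s + i) = true)) →
    (PySem.List.enumerate l s).foldl (fun acc p => if P p.2 then acc ++ [p.1] else acc) acc
      = acc ++ (PySem.List.pyRange s (s + l.length) 1).filter Q := by
  intro l
  induction l with
  | nil =>
    intro s acc _
    simp [PySem.List.enumerate]
  | cons x xs ih =>
    intro s acc hcond
    rw [PySem.List.enumerate_cons]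
    simp only [List.foldl_cons]
    rw [PySem.List.pyRange_one_cons (by simp only [List.length_cons]; push_cast; omega : s < s + ((x :: xs).length : Nat))]
    rw [List.filter_cons]
    have h0 : P x ↔ Q s = true := by simpa using hcond 0 (by simp)
    have hlen : s + (((x :: xs).length : Nat) : Int) = (s + 1) + ((xs.length : Nat) : Int) := by
      simp only [List.length_cons]; push_cast; ring
    rw [hlen]
    have hrec := ih (s + 1)
    by_cases hx : P x
    · rw [if_pos hx, hrec _ (fun i h => by
        have := hcond (i + 1) (by simpa using h)
        simpa [add_assoc, add_comm 1 (i : Int)] using this)]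
      simp [h0.mp hx, List.append_assoc]
    · rw [if_neg hx, hrec _ (fun i h => by
        have := hcond (i + 1) (by simpa using h)
        simpa [add_assoc, add_comm 1 (i : Int)] using this)]
      have : Q s = false := by
        cases hq : Q s
        · rfl
        · exact absurd (h0.mpr hq) hx
      simp [this]

-- a column equals the all-dots string of full height iff every row reaches it with a dot
lemma flatMap_if_eq_replicate_iff : ∀ (u : List String) (i : Nat),
    (u.flatMap (fun r => if i < r.toList.length then [r.toList.getD i ' '] else [])
        = List.replicate u.length '.')
      ↔ (∀ r ∈ u, i < r.toList.length ∧ r.toList.getD i ' ' = '.') := by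
  intro u i
  induction u with
  | nil => simp
  | cons r u ih =>
    simp only [List.flatMap_cons, List.length_cons]
    by_cases hi : i < r.toList.length
    · rw [if_pos hi]
      rw [show List.replicate (u.length + 1) '.' = '.' :: List.replicate u.length '.' from rfl]
      simp only [List.singleton_append, List.cons_eq_cons, List.forall_mem_cons]
      constructor
      · intro ⟨h1, h2⟩; exact ⟨⟨hi, h1⟩, ih.mp h2⟩
      · intro ⟨⟨_, h1⟩, h2⟩; exact ⟨h1, ih.mpr h2⟩
    · rw [if_neg hi]
      simp only [List.nil_append]
      constructor
      · intro h
        exfalso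
        have hle : (u.flatMap (fun r => if i < r.toList.length
            then [r.toList.getD i ' '] else [])).length ≤ u.length := by
          rw [List.length_flatMap]
          have := List.sum_le_card_nsmul
            (u.map (fun a => ((if i < a.toList.length then [a.toList.getD i ' '] else []) : List Char).length)) 1
            (by intro x hx
                rw [List.mem_map] at hx
                obtain ⟨a, _, rfl⟩ := hx
                split_ifs <;> simp)
          simpa using this
        rw [h] at hle
        simp at hle
      · intro h
        exact absurd (h r (by simp)).1 hi

-- the per-column dot counter equals countP of 'row reaches x with a dot'
lemma dot_counter_eq_countP (u : List String) (x : Nat) :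
    u.foldl (fun (n : Int) (r : String) =>
        if x < r.toList.length then n + (if r.toList.getD x ' ' == '.' then 1 else 0) else n) 0
      = ((u.countP (fun r => decide (x < r.toList.length ∧ r.toList.getD x ' ' = '.'))) : Int) := by
  have hfun : (fun (n : Int) (r : String) =>
        if x < r.toList.length then n + (if r.toList.getD x ' ' == '.' then 1 else 0) else n)
      = (fun (n : Int) (r : String) =>
        if (x < r.toList.length ∧ r.toList.getD x ' ' = '.') then n + 1 else n) := by
    funext n r
    by_cases h1 : x < r.toList.length
    · by_cases h2 : r.toList.getD x ' ' = '.'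
      · rw [if_pos h1, if_pos (show (r.toList.getD x ' ' == '.') = true from beq_iff_eq.mpr h2),
          if_pos (show x < r.toList.length ∧ r.toList.getD x ' ' = '.' from ⟨h1, h2⟩)]
      · rw [if_pos h1,
          if_neg (show ¬ ((r.toList.getD x ' ' == '.') = true) from fun hb => h2 (beq_iff_eq.mp hb)),
          add_zero, if_neg (show ¬ (x < r.toList.length ∧ r.toList.getD x ' ' = '.') from fun hc => h2 hc.2)]
    · rw [if_neg h1, if_neg (show ¬ (x < r.toList.length ∧ r.toList.getD x ' ' = '.') from fun hc => h1 hc.1)]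
  rw [hfun, PySem.List.foldl_ite_add_one]
  simp

-- A's outer column fold over the non-first rows, with the y=0 branch removed
lemma a_outer_tail : ∀ (l : List String) (s : Int) (cols : List (List Char)), 1 ≤ s →
    (PySem.List.enumerate l s).foldl
      (fun (cols : List (List Char)) p =>
        (PySem.List.enumerate p.2.toList 0).foldl
          (fun cols q =>
            if p.1 = 0 then cols ++ [[q.2]]
            else PySem.List.pySetD cols q.1 ((PySem.List.pyGetD cols q.1 []) ++ [q.2])) cols) cols
    = l.foldl (fun cols r =>
        (PySem.List.enumerate r.toList 0).foldl
          (fun cols q => PySem.List.pySetD cols q.1 ((PySem.List.pyGetD cols q.1 []) ++ [q.2])) cols) cols := by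
  intro l
  induction l with
  | nil => intro s cols _; simp [PySem.List.enumerate]
  | cons r l ih =>
    intro s cols hs
    rw [PySem.List.enumerate_cons]
    simp only [List.foldl_cons]
    have hne : (s ≠ 0) := by omega
    simp only [hne, if_false]
    exact ih (s + 1) _ (by omega)

-- A's first row builds the singleton columns
lemma a_first_row (r : String) (s : Int) :
    (PySem.List.enumerate r.toList s).foldl (fun (cols : List (List Char)) q => cols ++ [[q.2]]) []
    = r.toList.map (fun c => [c]) := by
  rw [PySem.List.foldl_append_singleton_eq_map (fun (q : Int × Char) => [q.2]) (PySem.List.enumerate r.toList s) []]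
  rw [show (fun (q : Int × Char) => [q.2]) = (fun c => [c]) ∘ (fun (q : Int × Char) => q.2) from rfl]
  rw [← List.map_map, PySem.List.map_snd_enumerate]
  simp

-- a list as a map over its range of indices
lemma map_eq_map_range_getD {α β : Type} (f : α → β) (l : List α) (d : α) :
    l.map f = (List.range l.length).map (fun i => f (l.getD i d)) := by
  apply List.ext_getElem
  · simp
  · intro i h1 h2
    simp only [List.getElem_map, List.getElem_range]
    congr 1
    rw [List.getD_eq_getElem?_getD, List.getElem?_eq_getElem (by simpa using h2)]
    rfl

-- ===== VERDICT (by name: the statement is the Claim_ definition above) =====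
theorem expand_universe_spec : Claim_equal_expand_universe := by
  intro u _ hpre
  obtain ⟨hne, hlen⟩ := hpre
  match u, hne with
  | r0 :: rest, _ =>
    simp only [List.headD_cons] at hlen
    unfold Spec_expand_universe expand_universe expand_universe_alt
    dsimp only
    rw [show ((r0 :: rest).headD "").toList.length = r0.toList.length from rfl]
    -- split B's pair-state loop into the rows fold and the counter fold
    rw [alt_fold_split r0.toList.length (r0 :: rest) 0 [] (List.replicate r0.toList.length (0 : Int))]
    rw [Prod.mk.injEq]
    constructor
    · -- rows: the two append-if folds have equivalent tests on every row (len ≤ width)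
      apply PySem.List.foldl_congr_mem'
      intro p hp acc
      have hmem : p.2 ∈ r0 :: rest := by
        rw [PySem.List.mem_enumerate_iff] at hp
        obtain ⟨k, hk, rfl⟩ := hp
        exact List.getElem_mem hk
      have hle := hlen p.2 hmem
      apply ite_test_eq
      rw [PySem.Str.count_eq p.2 "."]
      rw [show ("." : String).toList = ['.'] from rfl]
      rw [count_single, beq_iff_eq]
      exact (count_eq_width_iff p.2.toList r0.toList.length hle).symm
    · -- columns
      -- B's counter list, as a map over the column indices
      have hinit : List.replicate r0.toList.length (0 : Int)
          = (List.range r0.toList.length).map (fun _ => (0 : Int)) := by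
        apply List.ext_getElem <;> simp
      rw [hinit]
      rw [gen_rows_fold (fun n c => n + (if c == '.' then 1 else 0)) (0 : Int)
        r0.toList.length (r0 :: rest) (fun _ => 0) (fun r hm => hlen r hm)]
      -- A's column-string list, as a map over the column indices
      rw [PySem.List.enumerate_cons]
      simp only [List.foldl_cons, if_true]
      rw [a_first_row r0 0]
      rw [a_outer_tail rest (0 + 1) _ (by omega)]
      rw [show r0.toList.map (fun c => [c])
          = (List.range r0.toList.length).map (fun x => [r0.toList.getD x ' ']) from
        map_eq_map_range_getD (fun c => [c]) r0.toList ' ']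
      rw [gen_rows_fold (fun col c => col ++ [c]) ([] : List Char) r0.toList.length rest
        (fun x => [r0.toList.getD x ' ']) (fun r hm => hlen r (by simp [hm]))]
      -- A's third loop is a filter of range(width) by B's counter test
      refine (enum_foldl_if_pyRange
        (fun col : List Char => col = List.replicate (r0 :: rest).length '.')
        (fun x : Int =>
          PySem.List.pyGetD
            ((List.range r0.toList.length).map (fun x => (r0 :: rest).foldl
              (fun (a : Int) r => if x < r.toList.length
                then a + (if r.toList.getD x ' ' == '.' then 1 else 0) else a) 0)) x 0
            == ((r0 :: rest).length : Int))
        _ 0 [] ?_).trans ?_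
      · intro i hi
        simp only [List.length_map, List.length_range] at hi
        simp only [List.getElem_map, List.getElem_range]
        -- the A side: the column list at i equals the full-height dot string …
        have hshape : ∀ (rs : List String) (acc : List Char),
            rs.foldl (fun a r => if i < r.toList.length
                then a ++ [r.toList.getD i ' '] else a) acc
            = acc ++ rs.flatMap (fun r => if i < r.toList.length
                then [r.toList.getD i ' '] else []) := by
          intro rs
          induction rs with
          | nil => intro acc; simp
          | cons r rs ih =>
            intro acc
            simp only [List.foldl_cons, List.flatMap_cons]
            by_cases h : i < r.toList.length
            · rw [if_pos h, if_pos h, ih]; simp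
            · rw [if_neg h, if_neg h, ih]; simp
        rw [hshape]
        have hcol : [r0.toList.getD i ' ']
              ++ rest.flatMap (fun r => if i < r.toList.length then [r.toList.getD i ' '] else [])
            = (r0 :: rest).flatMap (fun r => if i < r.toList.length then [r.toList.getD i ' '] else []) := by
          rw [List.flatMap_cons, if_pos hi]
        rw [hcol, flatMap_if_eq_replicate_iff (r0 :: rest) i]
        -- … iff the B side: the counter at i equals the height
        have hzi : ((0 : Int) + (i : Nat)) = ((i : Nat) : Int) := by omega
        rw [hzi, PySem.List.pyGetD_natCast]
        have hgetd : ((List.range r0.toList.length).map (fun x => (r0 :: rest).foldl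
              (fun (a : Int) r => if x < r.toList.length
                then a + (if r.toList.getD x ' ' == '.' then 1 else 0) else a) 0)).getD i 0
            = (r0 :: rest).foldl
              (fun (a : Int) r => if i < r.toList.length
                then a + (if r.toList.getD i ' ' == '.' then 1 else 0) else a) 0 := by
          rw [List.getD_eq_getElem?_getD, List.getElem?_map]
          rw [List.getElem?_range hi]
          rfl
        rw [hgetd, dot_counter_eq_countP]
        rw [beq_iff_eq, Int.natCast_inj]
        rw [List.countP_eq_length]
        simp
      · simp only [List.length_map, List.length_range, List.nil_append, zero_add,
          List.foldl_cons]
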